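-- pv_equiv track=rewrite | github.com/CodecoolGlobal/keymaker-python-zoli0324 | keymaker.py | zig_zag_concatenate
-- ===== SOURCE A (Python) =====
-- def zig_zag_concatenate(matrix):
--     """
--     >>> zig_zag_concatenate(['abc', 'def', 'ghi', 'jkl'])
--     'adgjkhebcfil'
--     """
--     concatenate_string = ""
--
--     for col in range(len(matrix[0])):
--         for row in range(len(matrix)):
--             if col % 2 == 0:
--                 concatenate_string += matrix[row][col]
--             else:
--                 concatenate_string += matrix[len(matrix) - 1 - row][col]
--     return concatenate_string
-- ===== SOURCE B (Python) =====
-- def zig_zag_concatenate(matrix):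
--     n = len(matrix)
--     width = len(matrix[0])
--     out = [None] * (n * width)
--     for r in range(n):
--         row = matrix[r]
--         for c in range(width):
--             pos = c * n + (r if c % 2 == 0 else n - 1 - r)
--             out[pos] = row[c]
--     return ''.join(out)
-- ===== Notes on version B (the rewrite author's own statement) =====
-- stated objective: alternative
-- what changed: B makes a single row-major pass that scatters each character into a preallocated output buffer at its arithmetically computed final position (pos = col*n + (r or n-1-r)), instead of A's column-major gather with end-indexing and character-by-character string concatenation.
import Mathlib
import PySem

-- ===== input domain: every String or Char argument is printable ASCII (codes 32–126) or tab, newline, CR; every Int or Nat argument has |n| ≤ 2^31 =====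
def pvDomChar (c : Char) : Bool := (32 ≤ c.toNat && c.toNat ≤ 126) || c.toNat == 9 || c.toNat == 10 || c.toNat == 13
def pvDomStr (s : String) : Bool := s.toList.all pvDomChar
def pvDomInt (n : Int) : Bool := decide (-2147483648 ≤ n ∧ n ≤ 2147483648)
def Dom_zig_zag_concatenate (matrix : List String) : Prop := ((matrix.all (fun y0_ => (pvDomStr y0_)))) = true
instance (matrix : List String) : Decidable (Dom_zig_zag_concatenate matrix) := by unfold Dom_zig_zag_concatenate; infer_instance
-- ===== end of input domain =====

-- B replaces A's column-major gather (end-indexing, char-by-char +=) with a single row-major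
-- pass scattering each character into a preallocated buffer at its computed position
-- (alternative decomposition; return value only).

-- ===== PORT A =====
-- A builds a string char by char; the accumulator is ported as a List Char, wrapped with
-- String.ofList at the end. Indexing uses pyGetD with a default; Pre_ guarantees every index is
-- in range (where it is not, Python A raises IndexError).
def zig_zag_concatenate (matrix : List String) : String :=
  String.ofList <|
    (PySem.List.pyRange 0 (PySem.Str.len (PySem.List.pyGetD matrix 0 "")) 1).foldl
      (fun acc col =>
        (PySem.List.pyRange 0 (matrix.length : Int) 1).foldl
          (fun acc2 row =>
            acc2 ++ [if col % 2 == 0 then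
                       PySem.List.pyGetD (PySem.List.pyGetD matrix row "").toList col ' '
                     else
                       PySem.List.pyGetD (PySem.List.pyGetD matrix ((matrix.length : Int) - 1 - row) "").toList col ' '])
          acc)
      []

-- ===== PORT B =====
-- Python's `out = [None] * (n * width)` placeholder is modeled by ' '; under Pre_ every slot is
-- overwritten exactly once before the final join, so the placeholder is never in the output.
def zig_zag_concatenate_alt (matrix : List String) : String :=
  let n : Int := (matrix.length : Int)
  let width : Int := PySem.Str.len (PySem.List.pyGetD matrix 0 "")
  let out0 : List Char := List.replicate (n * width).toNat ' '
  let out :=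
    (PySem.List.pyRange 0 n 1).foldl
      (fun out r =>
        let row := PySem.List.pyGetD matrix r ""
        (PySem.List.pyRange 0 width 1).foldl
          (fun out c =>
            let pos : Int := c * n + (if c % 2 == 0 then r else n - 1 - r)
            out.set pos.toNat (PySem.List.pyGetD row.toList c ' '))
          out)
      out0
  String.ofList out

-- ===== PRECONDITION & SPEC =====
-- Pre_ excludes exactly the inputs on which Python A raises IndexError: the empty matrix
-- (matrix[0]) and ragged matrices with a row shorter than the first row (matrix[row][col]).
def Pre_zig_zag_concatenate (matrix : List String) : Prop :=
  matrix ≠ [] ∧ ∀ s ∈ matrix, (PySem.List.pyGetD matrix 0 "").toList.length ≤ s.toList.length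

instance (matrix : List String) : Decidable (Pre_zig_zag_concatenate matrix) := by
  unfold Pre_zig_zag_concatenate; infer_instance

def pvWitness_zig_zag_concatenate : List String := ["abc", "def", "ghi", "jkl"]

def Spec_zig_zag_concatenate (matrix : List String) (out : String) : Prop := out = zig_zag_concatenate_alt matrix
instance (matrix : List String) (out : String) : Decidable (Spec_zig_zag_concatenate matrix out) := by unfold Spec_zig_zag_concatenate; infer_instance

-- ===== CLAIM (what is proved, stated in full; the proofs are below) =====
def Claim_equal_zig_zag_concatenate : Prop := ∀ (matrix : List String), Dom_zig_zag_concatenate matrix → Pre_zig_zag_concatenate matrix → Spec_zig_zag_concatenate matrix (zig_zag_concatenate matrix)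

-- ===== LEMMAS AND PROOFS =====

-- the character of `matrix` at row r, column c (both Nat), with A's/B's defaults
def gChar (matrix : List String) (c r : Nat) : Char :=
  PySem.List.pyGetD (matrix.getD r "").toList (c : Int) ' '

-- the zig-zag source row for output slot r of column c
def posN (nn c r : Nat) : Nat := if c % 2 = 0 then r else nn - 1 - r

-- the common normal form: slot r of column c of the output holds gChar c (posN c r)
def gatherList (matrix : List String) : List Char :=
  (List.range (PySem.List.pyGetD matrix 0 "").toList.length).flatMap
    (fun c => (List.range matrix.length).map (fun r => gChar matrix c (posN matrix.length c r)))

theorem natCast_mod_two_beq (c : Nat) : ((c : Int) % 2 == 0) = decide (c % 2 = 0) := by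
  rcases Nat.mod_two_eq_zero_or_one c with h | h
  · have h2 : (c : Int) % 2 = 0 := by omega
    simp [h2, h]
  · have h2 : (c : Int) % 2 = 1 := by omega
    simp [h2, h]

-- ---- A equals the gather normal form ----

theorem A_col_eq (matrix : List String) (c : Nat) :
    (List.range matrix.length).map (fun r : Nat =>
        if ((c : Int) % 2 == 0) = true then
          PySem.List.pyGetD (PySem.List.pyGetD matrix (r : Int) "").toList (c : Int) ' '
        else
          PySem.List.pyGetD (PySem.List.pyGetD matrix ((matrix.length : Int) - 1 - (r : Int)) "").toList (c : Int) ' ')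
      = (List.range matrix.length).map (fun r => gChar matrix c (posN matrix.length c r)) := by
  rw [natCast_mod_two_beq]
  apply List.map_congr_left
  intro r hr
  have hr' : r < matrix.length := List.mem_range.mp hr
  by_cases h : c % 2 = 0
  · simp [h, gChar, posN, PySem.List.pyGetD_natCast]
  · have hcast : (matrix.length : Int) - 1 - (r : Int) = ((matrix.length - 1 - r : Nat) : Int) := by
      omega
    simp only [h, decide_false, Bool.false_eq_true, if_false, hcast, PySem.List.pyGetD_natCast]
    simp [gChar, posN, h]

theorem A_eq_gather (matrix : List String) :
    zig_zag_concatenate matrix = String.ofList (gatherList matrix) := by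
  unfold zig_zag_concatenate gatherList
  congr 1
  simp only [PySem.List.foldl_append_singleton_eq_map, PySem.List.foldl_append_eq_flatMap,
    List.nil_append, PySem.Str.len_eq, PySem.List.pyRange_zero_natCast, List.flatMap_def,
    List.map_map, Function.comp_def]
  congr 1
  apply List.map_congr_left
  intro c _
  exact A_col_eq matrix c

-- ---- generic lemmas about folding a list of (index, value) writes ----

theorem foldl_set_length (ws : List (Nat × Char)) (o : List Char) :
    (ws.foldl (fun o wv => o.set wv.1 wv.2) o).length = o.length := by
  induction ws generalizing o with
  | nil => rfl
  | cons w ws ih => simp [List.foldl_cons, ih]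

theorem foldl_set_getD_ne (ws : List (Nat × Char)) (o : List Char) (k : Nat)
    (h : ∀ wv ∈ ws, wv.1 ≠ k) :
    (ws.foldl (fun o wv => o.set wv.1 wv.2) o).getD k ' ' = o.getD k ' ' := by
  induction ws generalizing o with
  | nil => rfl
  | cons w ws ih =>
      rw [List.foldl_cons, ih _ (fun wv hm => h wv (List.mem_cons_of_mem _ hm))]
      simp only [List.getD_eq_getElem?_getD]
      rw [List.getElem?_set_ne (h w List.mem_cons_self)]

theorem foldl_set_getD_eq (ws : List (Nat × Char)) (o : List Char) (k : Nat) (val : Char)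
    (hk : k < o.length)
    (hall : ∀ wv ∈ ws, wv.1 = k → wv.2 = val)
    (hex : ∃ wv ∈ ws, wv.1 = k) :
    (ws.foldl (fun o wv => o.set wv.1 wv.2) o).getD k ' ' = val := by
  induction ws generalizing o with
  | nil => exact absurd hex (by simp)
  | cons w ws ih =>
      rw [List.foldl_cons]
      by_cases hrest : ∃ wv ∈ ws, wv.1 = k
      · exact ih _ (by simpa using hk) (fun wv hm => hall wv (List.mem_cons_of_mem _ hm)) hrest
      · have hw : w.1 = k := by
          rcases hex with ⟨wv, hm, hkey⟩
          rcases List.mem_cons.mp hm with rfl | hm'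
          · exact hkey
          · exact absurd ⟨wv, hm', hkey⟩ hrest
        rw [foldl_set_getD_ne _ _ _ (fun wv hm hkey => hrest ⟨wv, hm, hkey⟩)]
        simp only [List.getD_eq_getElem?_getD]
        rw [← hw, List.getElem?_set_self (by omega)]
        simpa using hall w List.mem_cons_self hw

-- ---- key/index arithmetic ----

theorem posN_lt (nn c r : Nat) (hr : r < nn) : posN nn c r < nn := by
  unfold posN; split <;> omega

theorem posN_posN (nn c r : Nat) (hr : r < nn) : posN nn c (posN nn c r) = r := by
  unfold posN; split <;> omega

theorem key_inj (nn c₁ p₁ c₂ p₂ : Nat) (h1 : p₁ < nn) (h2 : p₂ < nn)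
    (h : c₁ * nn + p₁ = c₂ * nn + p₂) : c₁ = c₂ ∧ p₁ = p₂ := by
  have e1 : (c₁ * nn + p₁) / nn = c₁ := by
    rw [Nat.add_comm, Nat.add_mul_div_right _ _ (by omega : 0 < nn), Nat.div_eq_of_lt h1]; omega
  have e2 : (c₂ * nn + p₂) / nn = c₂ := by
    rw [Nat.add_comm, Nat.add_mul_div_right _ _ (by omega : 0 < nn), Nat.div_eq_of_lt h2]; omega
  have hc : c₁ = c₂ := by rw [← e1, ← e2, h]
  constructor
  · exact hc
  · subst hc; omega

-- ---- getD of the gather normal form ----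

theorem gather_chunk_len (nn : Nat) (F : Nat → Nat → Char) (w : Nat) :
    ((List.range w).flatMap (fun c => (List.range nn).map (F c))).length = w * nn := by
  induction w with
  | zero => simp
  | succ w ih =>
      rw [List.range_succ, List.flatMap_append, List.length_append, ih]
      simp [Nat.succ_mul]

theorem gather_getD (nn : Nat) (F : Nat → Nat → Char) (w c r : Nat)
    (hc : c < w) (hr : r < nn) :
    ((List.range w).flatMap (fun c => (List.range nn).map (F c))).getD (c * nn + r) ' ' = F c r := by
  induction w with
  | zero => omega
  | succ w ih =>
      rw [List.range_succ, List.flatMap_append]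
      by_cases h : c < w
      · rw [List.getD_eq_getElem?_getD, List.getElem?_append_left
          (by rw [gather_chunk_len]
              calc c * nn + r < c * nn + nn := by omega
                _ = (c + 1) * nn := by ring
                _ ≤ w * nn := Nat.mul_le_mul_right _ (by omega)),
          ← List.getD_eq_getElem?_getD]
        exact ih h
      · have hcw : c = w := by omega
        subst hcw
        rw [List.getD_eq_getElem?_getD, List.getElem?_append_right
          (by rw [gather_chunk_len]; omega)]
        rw [gather_chunk_len]
        have hsub : c * nn + r - c * nn = r := by omega
        rw [hsub]
        simp [List.getElem?_range hr]

-- ---- B equals the gather normal form ----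

-- B as a pure-Nat fold over the flat list of (position, character) writes
theorem B_as_writes (matrix : List String) :
    zig_zag_concatenate_alt matrix = String.ofList
      (((List.range matrix.length).flatMap (fun r =>
          (List.range (PySem.List.pyGetD matrix 0 "").toList.length).map (fun c =>
            (c * matrix.length + posN matrix.length c r, gChar matrix c r)))).foldl
        (fun o wv => o.set wv.1 wv.2)
        (List.replicate (matrix.length * (PySem.List.pyGetD matrix 0 "").toList.length) ' ')) := by
  unfold zig_zag_concatenate_alt
  simp only [PySem.Str.len_eq, PySem.List.pyRange_zero_natCast, List.foldl_map,
    List.foldl_flatMap]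
  congr 1
  have hinit : ((matrix.length : Int) * ((PySem.List.pyGetD matrix 0 "").toList.length : Int)).toNat
      = matrix.length * (PySem.List.pyGetD matrix 0 "").toList.length := by
    rw [← Nat.cast_mul, Int.toNat_natCast]
  rw [hinit]
  apply PySem.List.foldl_congr_mem'
  intro r hr o
  have hrlt : r < matrix.length := List.mem_range.mp hr
  apply PySem.List.foldl_congr_mem'
  intro c _ o2
  simp only [PySem.List.pyGetD_natCast, natCast_mod_two_beq]
  congr 1
  · -- the write position
    unfold posN
    by_cases h : c % 2 = 0
    · simp only [h, decide_true, if_true]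
      rw [show ((c : Int) * (matrix.length : Int) + (r : Int))
            = ((c * matrix.length + r : Nat) : Int) by push_cast; ring, Int.toNat_natCast]
    · have hcast : (matrix.length : Int) - 1 - (r : Int)
          = ((matrix.length - 1 - r : Nat) : Int) := by omega
      simp only [h, decide_false, Bool.false_eq_true, if_false, hcast]
      rw [show ((c : Int) * (matrix.length : Int) + ((matrix.length - 1 - r : Nat) : Int))
            = ((c * matrix.length + (matrix.length - 1 - r) : Nat) : Int) by push_cast; ring,
        Int.toNat_natCast]
  · -- the written character
    simp [gChar]

theorem B_eq_gather (matrix : List String) :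
    zig_zag_concatenate_alt matrix = String.ofList (gatherList matrix) := by
  rw [B_as_writes]
  congr 1
  set nn := matrix.length with hnn
  set w := (PySem.List.pyGetD matrix 0 "").toList.length with hw
  have hlen : (((List.range nn).flatMap (fun r =>
      (List.range w).map (fun c => (c * nn + posN nn c r, gChar matrix c r)))).foldl
        (fun o wv => o.set wv.1 wv.2) (List.replicate (nn * w) ' ')).length = w * nn := by
    rw [foldl_set_length]; simp [Nat.mul_comm]
  apply List.ext_getElem
  · rw [hlen]; unfold gatherList; rw [gather_chunk_len]
  · intro k hk1 hk2
    have hkw : k < w * nn := by rw [hlen] at hk1; exact hk1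
    have hnn0 : 0 < nn := by
      by_contra hcon
      have h0 : nn = 0 := by omega
      rw [h0, Nat.mul_zero] at hkw
      omega
    set c := k / nn with hc
    set r := k % nn with hr
    have hclt : c < w := Nat.div_lt_of_lt_mul (by rw [Nat.mul_comm]; exact hkw)
    have hrlt : r < nn := Nat.mod_lt _ hnn0
    have hkey : c * nn + r = k := by rw [hc, hr, Nat.mul_comm]; exact Nat.div_add_mod k nn
    rw [← List.getD_eq_getElem _ ' ' hk1, ← List.getD_eq_getElem _ ' ' hk2]
    have hgather : (gatherList matrix).getD k ' ' = gChar matrix c (posN nn c r) := by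
      unfold gatherList
      rw [← hkey]
      exact gather_getD nn (fun c r => gChar matrix c (posN nn c r)) w c r hclt hrlt
    rw [hgather]
    apply foldl_set_getD_eq
    · simpa [Nat.mul_comm nn w] using hkw
    · -- every write hitting slot k writes exactly this character
      intro wv hm hkeyw
      simp only [List.mem_flatMap, List.mem_map, List.mem_range] at hm
      obtain ⟨r₂, hr₂, c₂, hc₂, rfl⟩ := hm
      simp only at hkeyw
      have hpos := posN_lt nn c₂ r₂ hr₂
      obtain ⟨hceq, hpr⟩ := key_inj nn c₂ (posN nn c₂ r₂) c r hpos hrlt (hkeyw.trans hkey.symm)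
      subst hceq
      have hr2 : posN nn c r = r₂ := by
        rw [← hpr]; exact posN_posN nn c r₂ hr₂
      rw [hr2]
    · refine ⟨(c * nn + posN nn c (posN nn c r), gChar matrix c (posN nn c r)), ?_, ?_⟩
      · simp only [List.mem_flatMap, List.mem_map, List.mem_range]
        exact ⟨posN nn c r, posN_lt nn c r hrlt, c, hclt, rfl⟩
      · simp only []
        rw [posN_posN nn c r hrlt]
        exact hkey

-- ===== VERDICT (by name: the statement is the Claim_ definition above) =====
theorem zig_zag_concatenate_spec : Claim_equal_zig_zag_concatenate := by
  intro matrix _ _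
  unfold Spec_zig_zag_concatenate
  rw [A_eq_gather, B_eq_gather]
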